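-- pv_equiv track=rewrite | github.com/CSVince/MockTeams | backend/src/channel.py | check_auth_id_u_id_membership
-- ===== SOURCE A (Python) =====
-- def check_auth_id_u_id_membership(auth_user_id, u_id, channel_member_list):
--     '''
--     Function to check if an authenticated user's ID or a u_id is in a channel
--     member list
--     '''
--     found_inviter = False
--     found_invitee = False
--     for member_id in channel_member_list:
--         if u_id == member_id:
--             found_invitee = True
--         if auth_user_id == member_id:
--             found_inviter = True
--
--     return {
--         'found_u_id': found_invitee,
--         'found_auth_user_id': found_inviter
--     }
-- ===== SOURCE B (Python) =====
-- def check_auth_id_u_id_membership(auth_user_id, u_id, channel_member_list):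
--     srt = sorted(channel_member_list)
--
--     def found(x):
--         lo, hi = 0, len(srt)
--         while lo < hi:
--             mid = (lo + hi) // 2
--             if srt[mid] < x:
--                 lo = mid + 1
--             else:
--                 hi = mid
--         return lo < len(srt) and srt[lo] == x
--
--     return {
--         'found_u_id': found(u_id),
--         'found_auth_user_id': found(auth_user_id)
--     }
-- ===== Notes on version B (the rewrite author's own statement) =====
-- stated objective: alternative
-- what changed: Replaces the single fused linear scan with two boolean accumulators by a different algorithm: sort the member list once, then answer each of the two id queries with a hand-written binary search (bisect_left) over the sorted copy.
import Mathlib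
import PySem

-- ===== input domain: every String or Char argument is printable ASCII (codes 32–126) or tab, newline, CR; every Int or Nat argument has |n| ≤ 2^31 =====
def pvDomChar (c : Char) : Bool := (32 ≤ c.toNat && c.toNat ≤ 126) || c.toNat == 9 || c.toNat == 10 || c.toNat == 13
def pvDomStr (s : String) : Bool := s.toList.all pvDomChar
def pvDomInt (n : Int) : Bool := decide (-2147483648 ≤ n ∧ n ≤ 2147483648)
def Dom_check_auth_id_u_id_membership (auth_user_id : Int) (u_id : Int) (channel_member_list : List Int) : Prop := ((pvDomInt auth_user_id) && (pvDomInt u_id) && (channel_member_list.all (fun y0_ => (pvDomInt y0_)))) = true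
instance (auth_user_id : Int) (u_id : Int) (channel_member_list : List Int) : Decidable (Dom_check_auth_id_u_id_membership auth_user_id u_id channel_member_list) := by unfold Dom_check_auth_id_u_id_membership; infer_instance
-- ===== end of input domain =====

-- B replaces A's single fused linear scan with sort-once + binary search per id; objective: alternative.

-- ===== PORT A =====
-- A: one fused loop over the list maintaining two flags (found_inviter, found_invitee)
def check_auth_id_u_id_membership (auth_user_id : Int) (u_id : Int) (channel_member_list : List Int) : List (String × Bool) :=
  let st := channel_member_list.foldl
    (fun (st : Bool × Bool) member_id =>
      let st := if u_id == member_id then (st.1, true) else st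
      let st := if auth_user_id == member_id then (true, st.2) else st
      st)
    (false, false)
  [("found_u_id", st.2), ("found_auth_user_id", st.1)]

-- ===== PORT B =====
-- B helper: the while-loop of found(x) — bisect_left-style binary search; lo, hi are the
-- loop variables (nonnegative ints in Python, so Nat here; (lo+hi)//2 = Nat division).
-- srt[mid] is always in range when read (lo < hi ≤ len), so getD 0 is exact.
def pvBsGo (srt : List Int) (x : Int) (lo hi : Nat) : Nat :=
  if lo < hi then
    let mid := (lo + hi) / 2
    if srt.getD mid 0 < x then pvBsGo srt x (mid + 1) hi
    else pvBsGo srt x lo mid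
  else lo
termination_by hi - lo
decreasing_by all_goals omega

-- B helper: found(x) = the binary-search landing index holds x
def pvFound (srt : List Int) (x : Int) : Bool :=
  let lo := pvBsGo srt x 0 srt.length
  decide (lo < srt.length) && (srt.getD lo 0 == x)

-- B: sort the member list once, then answer each id query by binary search
def check_auth_id_u_id_membership_alt (auth_user_id : Int) (u_id : Int) (channel_member_list : List Int) : List (String × Bool) :=
  let srt := PySem.List.sorted channel_member_list (fun y => y) false
  [("found_u_id", pvFound srt u_id), ("found_auth_user_id", pvFound srt auth_user_id)]

-- ===== PRECONDITION & SPEC =====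
def Spec_check_auth_id_u_id_membership (auth_user_id : Int) (u_id : Int) (channel_member_list : List Int) (out : List (String × Bool)) : Prop := out = check_auth_id_u_id_membership_alt auth_user_id u_id channel_member_list
instance (auth_user_id : Int) (u_id : Int) (channel_member_list : List Int) (out : List (String × Bool)) : Decidable (Spec_check_auth_id_u_id_membership auth_user_id u_id channel_member_list out) := by unfold Spec_check_auth_id_u_id_membership; infer_instance

-- ===== CLAIM (what is proved, stated in full; the proofs are below) =====
def Claim_equal_check_auth_id_u_id_membership : Prop := ∀ (auth_user_id : Int) (u_id : Int) (channel_member_list : List Int), Dom_check_auth_id_u_id_membership auth_user_id u_id channel_member_list → Spec_check_auth_id_u_id_membership auth_user_id u_id channel_member_list (check_auth_id_u_id_membership auth_user_id u_id channel_member_list)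

-- ===== LEMMAS AND PROOFS =====
-- A's fused loop computes the two membership flags
theorem pv_fold_contains (auth_user_id u_id : Int) (l : List Int) (fi fe : Bool) :
    l.foldl
      (fun (st : Bool × Bool) member_id =>
        let st := if u_id == member_id then (st.1, true) else st
        let st := if auth_user_id == member_id then (true, st.2) else st
        st)
      (fi, fe)
    = (fi || l.contains auth_user_id, fe || l.contains u_id) := by
  induction l generalizing fi fe with
  | nil => simp
  | cons x xs ih =>
    rw [List.foldl_cons]
    have hstep :
        (let st := if u_id == x then (((fi, fe) : Bool × Bool).1, true) else (fi, fe)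
         let st := if auth_user_id == x then (true, st.2) else st
         st)
        = (fi || (auth_user_id == x), fe || (u_id == x)) := by
      by_cases hu : u_id = x <;> by_cases ha : auth_user_id = x <;> simp [hu, ha]
    rw [hstep, ih]
    simp only [List.contains_cons, Bool.or_assoc]

-- monotone access on a sorted list
theorem pv_sorted_mono (srt : List Int) (hs : srt.Pairwise (· ≤ ·))
    {i j : Nat} (hij : i ≤ j) (hj : j < srt.length) :
    srt.getD i 0 ≤ srt.getD j 0 := by
  rcases Nat.eq_or_lt_of_le hij with h | h
  · subst h; exact le_refl _
  · rw [List.getD_eq_getElem srt 0 (lt_trans h hj), List.getD_eq_getElem srt 0 hj]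
    exact (List.pairwise_iff_getElem.mp hs) i j (lt_trans h hj) hj h

-- binary-search invariant: everything left of the landing index is < x,
-- everything from it on is ≥ x
theorem pv_bsGo_inv (srt : List Int) (x : Int) (hs : srt.Pairwise (· ≤ ·))
    (lo hi : Nat) (hhi : hi ≤ srt.length)
    (hlow : ∀ i, i < lo → srt.getD i 0 < x)
    (hhigh : ∀ i, hi ≤ i → i < srt.length → x ≤ srt.getD i 0) :
    (∀ i, i < pvBsGo srt x lo hi → srt.getD i 0 < x) ∧
    (∀ i, pvBsGo srt x lo hi ≤ i → i < srt.length → x ≤ srt.getD i 0) := by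
  by_cases h : lo < hi
  · have hmidlt : (lo + hi) / 2 < hi := by omega
    rw [pvBsGo, if_pos h]
    by_cases hm : srt.getD ((lo + hi) / 2) 0 < x
    · rw [if_pos hm]
      exact pv_bsGo_inv srt x hs ((lo + hi) / 2 + 1) hi hhi
        (fun i hi' => lt_of_le_of_lt
          (pv_sorted_mono srt hs (by omega) (by omega)) hm)
        hhigh
    · rw [if_neg hm]
      exact pv_bsGo_inv srt x hs lo ((lo + hi) / 2) (by omega)
        hlow
        (fun i hi1 hi2 => le_trans (not_lt.mp hm)
          (pv_sorted_mono srt hs hi1 hi2))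
  · rw [pvBsGo, if_neg h]
    exact ⟨hlow, fun i hi1 hi2 => hhigh i (by omega) hi2⟩
termination_by hi - lo
decreasing_by all_goals omega

-- found(x) on a sorted list is membership
theorem pv_found_contains (srt : List Int) (x : Int) (hs : srt.Pairwise (· ≤ ·)) :
    pvFound srt x = srt.contains x := by
  obtain ⟨h1, h2⟩ := pv_bsGo_inv srt x hs 0 srt.length (le_refl _)
    (by omega) (fun i hi1 hi2 => by omega)
  set r := pvBsGo srt x 0 srt.length with hr
  unfold pvFound
  rw [← hr]
  by_cases hx : x ∈ srt
  · obtain ⟨j, hj, hje⟩ := List.mem_iff_getElem.mp hx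
    have hjD : srt.getD j 0 = x := by rw [List.getD_eq_getElem srt 0 hj, hje]
    have hrj : r ≤ j := by
      by_contra hlt
      exact absurd hjD (ne_of_lt (h1 j (by omega)))
    have hrl : r < srt.length := lt_of_le_of_lt hrj hj
    have hge : x ≤ srt.getD r 0 := h2 r (le_refl _) hrl
    have hle : srt.getD r 0 ≤ x := hjD ▸ pv_sorted_mono srt hs hrj hj
    have hDr : srt.getD r 0 = x := le_antisymm hle hge
    rw [List.getD_eq_getElem srt 0 hrl] at hDr
    simp [List.contains_eq_mem, hx, hrl, hDr]
  · by_cases hrl : r < srt.length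
    · have hne : srt.getD r 0 ≠ x := by
        intro he
        apply hx
        rw [← he, List.getD_eq_getElem srt 0 hrl]
        exact srt.getElem_mem hrl
      rw [List.getD_eq_getElem srt 0 hrl] at hne
      simp [List.contains_eq_mem, hx, hrl, hne]
    · simp [List.contains_eq_mem, hx, hrl]

-- ===== VERDICT (by name: the statement is the Claim_ definition above) =====
theorem check_auth_id_u_id_membership_spec : Claim_equal_check_auth_id_u_id_membership := by
  intro a u l _
  unfold Spec_check_auth_id_u_id_membership check_auth_id_u_id_membership
    check_auth_id_u_id_membership_alt
  rw [pv_fold_contains]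
  have hs : (PySem.List.sorted l (fun y => y) false).Pairwise (· ≤ ·) :=
    PySem.List.sorted_pairwise l (fun y => y)
  have hcw : ∀ y : Int,
      (PySem.List.sorted l (fun y => y) false).contains y = l.contains y := by
    intro y
    simp [List.contains_eq_mem, PySem.List.mem_sorted]
  show [("found_u_id", false || l.contains u), ("found_auth_user_id", false || l.contains a)]
      = [("found_u_id", pvFound (PySem.List.sorted l (fun y => y) false) u),
         ("found_auth_user_id", pvFound (PySem.List.sorted l (fun y => y) false) a)]
  rw [pv_found_contains _ _ hs, pv_found_contains _ _ hs, hcw, hcw]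
  simp
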